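-- pv_equiv track=rewrite | github.com/Kartikay26/CodeForces-solutions | codeforces/954/A.py | replstr
-- ===== SOURCE A (Python) =====
-- def replstr(s):
--     r = ""
--     d = 0
--     i = 0
--     while i < len(s):
--         z = s[i:i+2]
--         if z=="UR" or z=="RU":
--             r += "D"
--             d += 1
--             i += 1
--         else:
--             r += z[0]
--         i += 1
--     return d,r
-- ===== SOURCE B (Python) =====
-- def replstr(s):
--     prev = None
--     res = []
--     count = 0
--     for c in s:
--         if prev is not None and prev + c in ("UR", "RU"):
--             res.append("D")
--             count += 1
--             prev = None
--         else:
--             if prev is not None: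
--                 res.append(prev)
--             prev = c
--     if prev is not None:
--         res.append(prev)
--     return count, "".join(res)
-- ===== Notes on version B (the rewrite author's own statement) =====
-- stated objective: faster
-- what changed: Replaced the index-and-slice while loop with quadratic string concatenation (r += rebuilds r each step) by a streaming for-loop over the characters keeping one pending character, appending to a list joined once at the end.
import Mathlib
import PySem

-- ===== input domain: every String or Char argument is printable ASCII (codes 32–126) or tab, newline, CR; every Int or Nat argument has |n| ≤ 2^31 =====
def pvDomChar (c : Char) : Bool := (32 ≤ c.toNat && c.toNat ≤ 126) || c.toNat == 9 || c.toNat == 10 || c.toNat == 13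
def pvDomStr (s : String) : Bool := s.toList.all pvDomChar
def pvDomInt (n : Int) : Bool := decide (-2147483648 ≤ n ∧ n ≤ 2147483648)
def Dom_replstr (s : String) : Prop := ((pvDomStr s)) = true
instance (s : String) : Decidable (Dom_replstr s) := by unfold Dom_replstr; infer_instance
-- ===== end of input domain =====

-- B replaces A's index/slice while-loop (with quadratic string concatenation) by a single
-- streaming pass keeping one pending character; same return value, list joined once at the end.

-- ===== PORT A =====
-- while i < len(s): z = s[i:i+2]; if z in ("UR","RU"): r += "D"; d += 1; i += 2 else: r += z[0]; i += 1
def replstrLoop (l : List Char) (i : Nat) (d : Int) (r : List Char) : Int × String :=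
  if _h : i < l.length then
    let z := PySem.List.slice l (some (i : Int)) (some ((i : Int) + 2))
    if z = ['U', 'R'] ∨ z = ['R', 'U'] then
      replstrLoop l (i + 2) (d + 1) (r ++ ['D'])
    else
      replstrLoop l (i + 1) d (r ++ [PySem.List.pyGetD z 0 ' '])
  else
    (d, String.ofList r)
termination_by l.length - i

def replstr (s : String) : Int × String :=
  replstrLoop s.toList 0 0 []

-- ===== PORT B =====
-- one step of the streaming loop: state = (pending prev, output so far, count)
def replstrStep (st : Option Char × List Char × Int) (c : Char) : Option Char × List Char × Int :=
  match st with
  | (some p, out, cnt) =>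
    if (p = 'U' ∧ c = 'R') ∨ (p = 'R' ∧ c = 'U') then (none, out ++ ['D'], cnt + 1)
    else (some c, out ++ [p], cnt)
  | (none, out, cnt) => (some c, out, cnt)

def replstr_alt (s : String) : Int × String :=
  match s.toList.foldl replstrStep (none, [], 0) with
  | (some p, out, cnt) => (cnt, String.ofList (out ++ [p]))
  | (none, out, cnt) => (cnt, String.ofList out)

-- ===== PRECONDITION & SPEC =====
def Spec_replstr (s : String) (out : Int × String) : Prop := out = replstr_alt s
instance (s : String) (out : Int × String) : Decidable (Spec_replstr s out) := by unfold Spec_replstr; infer_instance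

-- ===== CLAIM (what is proved, stated in full; the proofs are below) =====
def Claim_equal_replstr : Prop := ∀ (s : String), Dom_replstr s → Spec_replstr s (replstr s)

-- ===== LEMMAS AND PROOFS =====

-- common specification: greedy left-to-right collapse of adjacent UR/RU pairs
def collapse : List Char → Int × List Char
  | [] => (0, [])
  | [a] => (0, [a])
  | a :: b :: t =>
    if (a = 'U' ∧ b = 'R') ∨ (a = 'R' ∧ b = 'U') then
      let p := collapse t
      (p.1 + 1, 'D' :: p.2)
    else
      let p := collapse (b :: t)
      (p.1, a :: p.2)

theorem replstrLoop_eq (l : List Char) (i : Nat) (d : Int) (r : List Char) :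
    replstrLoop l i d r = (d + (collapse (l.drop i)).1, String.ofList (r ++ (collapse (l.drop i)).2)) := by
  by_cases h : i < l.length
  · obtain ⟨a, rest, hd⟩ : ∃ a rest, l.drop i = a :: rest := by
      cases hdd : l.drop i with
      | nil => exact absurd (List.drop_eq_nil_iff.mp hdd) (by omega)
      | cons a rest => exact ⟨a, rest, rfl⟩
    have hz : PySem.List.slice l (some (i : Int)) (some ((i : Int) + 2)) = (l.drop i).take 2 := by
      have := PySem.List.slice_natCast_add (xs := l) (j := i) (n := 2)
      simpa using this
    rw [replstrLoop, dif_pos h, hz, hd]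
    cases rest with
    | nil =>
      -- last character: z = [a], no pair possible
      rw [List.take, List.take, if_neg (by simp)]
      have hdrop1 : l.drop (i + 1) = [] := by
        have : l.drop (i + 1) = (l.drop i).drop 1 := by
          rw [← List.drop_drop]
        simp [this, hd]
      rw [replstrLoop_eq l (i + 1) d _, hdrop1]
      simp [collapse, PySem.List.pyGetD]
    | cons b t =>
      have hdrop1 : l.drop (i + 1) = b :: t := by
        have : l.drop (i + 1) = (l.drop i).drop 1 := by rw [← List.drop_drop]
        simp [this, hd]
      have hdrop2 : l.drop (i + 2) = t := by
        have : l.drop (i + 2) = (l.drop i).drop 2 := by rw [← List.drop_drop]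
        simp [this, hd]
      have htake : List.take 2 (a :: b :: t) = [a, b] := rfl
      by_cases hp : (a = 'U' ∧ b = 'R') ∨ (a = 'R' ∧ b = 'U')
      · have hzz : (List.take 2 (a :: b :: t) = ['U', 'R'] ∨ List.take 2 (a :: b :: t) = ['R', 'U']) := by
          rw [htake]; simp only [List.cons.injEq, and_true]; simpa using hp
        rw [if_pos hzz, replstrLoop_eq l (i + 2) (d + 1) _, hdrop2]
        simp only [collapse, if_pos hp]
        rw [Prod.mk.injEq]
        exact ⟨by ring, by simp⟩
      · have hzz : ¬ (List.take 2 (a :: b :: t) = ['U', 'R'] ∨ List.take 2 (a :: b :: t) = ['R', 'U']) := by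
          rw [htake]; simpa using hp
        rw [if_neg hzz, replstrLoop_eq l (i + 1) d _, hdrop1]
        simp only [collapse, if_neg hp]
        rw [Prod.mk.injEq]
        refine ⟨rfl, ?_⟩
        simp [htake, PySem.List.pyGetD]
  · rw [replstrLoop, dif_neg h]
    have : l.drop i = [] := List.drop_eq_nil_iff.mpr (by omega)
    simp [this, collapse]
termination_by l.length - i

-- B's fold with a pending character computes collapse
theorem foldB_eq (t : List Char) :
    (∀ out cnt, (match t.foldl replstrStep (none, out, cnt) with
      | (some p, o, c) => ((c : Int), o ++ [p])
      | (none, o, c) => (c, o)) = (cnt + (collapse t).1, out ++ (collapse t).2)) ∧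
    (∀ p out cnt, (match t.foldl replstrStep (some p, out, cnt) with
      | (some q, o, c) => ((c : Int), o ++ [q])
      | (none, o, c) => (c, o)) = (cnt + (collapse (p :: t)).1, out ++ (collapse (p :: t)).2)) := by
  induction t with
  | nil =>
    constructor
    · intro out cnt; simp [collapse]
    · intro p out cnt; simp [collapse, List.foldl]
  | cons c t' ih =>
    constructor
    · intro out cnt
      simp only [List.foldl, replstrStep]
      exact ih.2 c out cnt
    · intro p out cnt
      simp only [List.foldl, replstrStep]
      by_cases hp : (p = 'U' ∧ c = 'R') ∨ (p = 'R' ∧ c = 'U')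
      · rw [if_pos hp]
        rw [ih.1 (out ++ ['D']) (cnt + 1)]
        simp only [collapse, if_pos hp]
        rw [Prod.mk.injEq]
        exact ⟨by ring, by simp⟩
      · rw [if_neg hp]
        rw [ih.2 c (out ++ [p]) cnt]
        simp only [collapse, if_neg hp]
        rw [Prod.mk.injEq]
        exact ⟨rfl, by simp⟩

-- ===== VERDICT (by name: the statement is the Claim_ definition above) =====
theorem replstr_spec : Claim_equal_replstr := by
  intro s _
  unfold Spec_replstr replstr replstr_alt
  rw [replstrLoop_eq]
  have h := (foldB_eq s.toList).1 [] 0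
  rcases hf : s.toList.foldl replstrStep (none, [], 0) with ⟨fst, o, c⟩
  rw [hf] at h
  cases fst <;>
    (simp only [List.drop_zero]
     rw [Prod.mk.injEq] at h
     rw [Prod.mk.injEq]
     exact ⟨by rw [h.1], by rw [← h.2]⟩)
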